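-- pv_equiv track=rewrite | github.com/FranciscoMeloJr/Python-Tests | banks/bank_test.py | account_name
-- ===== SOURCE A (Python) =====
-- eligible_institutions = [
--     {
--     'institution_name': 'BMO',
--     'transit_number': '001',
--     },
--     {
--     'institution_name': 'SCOTIA_BANK',
--     'transit_number': '002',
--     },
--     {
--     'institution_name': 'NATIONAL',
--     'transit_number': '003',
--     'institution_number': '27',
--     },
-- {
--     'institution_name': 'TD',
--     'transit_number': '003',
--     'institution_number': '32',
--     },
-- {
--     'institution_name': 'XPTO',
--     'transit_number': '003',
--     'institution_number': '55',
--     }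
-- ]
--
-- def is_there(account_first_number):
--     elegible_inst_numbers = []
--     for each_bank in eligible_institutions:
--         elegible_inst_numbers.append(each_bank['transit_number'])
--     set_eleg = set(elegible_inst_numbers)
--
--     # it is there
--     if account_first_number in set_eleg:
--         return True
--     else:
--         return False
--
-- def find_name2(new_dict, account):
--     """
--     Find the name of a bank from an account.
--     :param new_dict: new classification for the keys
--     :param account: client's account
--     :return: name of the bank.
--     """
--     for each_bank_key in new_dict.keys():
--         p1 = each_bank_key[0]
--         p2 = each_bank_key[1]
--         if account['transit_number'] == p1:
--             if p2 is not -1: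
--                 if p2 ==  account['institution_number']:
--                     return new_dict[(p1,p2)]
--             else: # so p1 == account
--                 return new_dict[(p1,p2)]
--
-- def create_new_dict():
--     """
--     Create a new dict with the keys of both: transit+institution
--     :return:
--     """
--     bank_name = {}
--     for each_bank in eligible_institutions:
--         inst_number = each_bank.get('institution_number')
--         if inst_number is None:
--             bank_name[(each_bank['transit_number'], -1)] = each_bank['institution_name']
--         else:
--             bank_name[(each_bank['transit_number'], each_bank['institution_number'])] = each_bank['institution_name']
--
--     return bank_name
--
-- def account_name(client_banks):
--     """
--     This function will find the name of a bank from a client's account.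
--     """
--     dict_banks = create_new_dict()
--     result = []
--     for each in client_banks:
--         # client_bank_accounts[0]
--         account_first = each
--         account_first_number = account_first['transit_number']
--         if is_there(account_first_number):
--             temp = "Account registered: " + find_name2(dict_banks, account_first)
--             result.append(temp)
--
--         else:
--             result.append("Account not registered")
--
--     return result
-- ===== SOURCE B (Python) =====
-- eligible_institutions = [
--     {'institution_name': 'BMO', 'transit_number': '001'},
--     {'institution_name': 'SCOTIA_BANK', 'transit_number': '002'},
--     {'institution_name': 'NATIONAL', 'transit_number': '003', 'institution_number': '27'},
--     {'institution_name': 'TD', 'transit_number': '003', 'institution_number': '32'},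
--     {'institution_name': 'XPTO', 'transit_number': '003', 'institution_number': '55'},
-- ]
--
-- def account_name(client_banks):
--     """Map each client account to its bank name via direct lookup tables built once."""
--     transit_only = {}   # transit -> name, for banks without an institution_number
--     pair_table = {}     # (transit, institution_number) -> name
--     valid = set()
--     for bank in eligible_institutions:
--         valid.add(bank['transit_number'])
--         inst = bank.get('institution_number')
--         if inst is None:
--             transit_only[bank['transit_number']] = bank['institution_name']
--         else:
--             pair_table[(bank['transit_number'], inst)] = bank['institution_name']
--     result = []
--     for acct in client_banks:
--         t = acct['transit_number']
--         if t not in valid: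
--             result.append("Account not registered")
--         elif t in transit_only:
--             result.append("Account registered: " + transit_only[t])
--         else:
--             result.append("Account registered: " + pair_table.get((t, acct['institution_number'])))
--     return result
-- ===== Notes on version B (the rewrite author's own statement) =====
-- stated objective: simpler
-- what changed: Replaces A's per-account rebuild of the transit set and the inner ordered scan over the sentinel-keyed dict (find_name2 with -1 keys) by lookup tables built once (transit-only names, (transit,institution) names, valid-transit set), so each account is handled by constant-time lookups with no inner loop.
import Mathlib
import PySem

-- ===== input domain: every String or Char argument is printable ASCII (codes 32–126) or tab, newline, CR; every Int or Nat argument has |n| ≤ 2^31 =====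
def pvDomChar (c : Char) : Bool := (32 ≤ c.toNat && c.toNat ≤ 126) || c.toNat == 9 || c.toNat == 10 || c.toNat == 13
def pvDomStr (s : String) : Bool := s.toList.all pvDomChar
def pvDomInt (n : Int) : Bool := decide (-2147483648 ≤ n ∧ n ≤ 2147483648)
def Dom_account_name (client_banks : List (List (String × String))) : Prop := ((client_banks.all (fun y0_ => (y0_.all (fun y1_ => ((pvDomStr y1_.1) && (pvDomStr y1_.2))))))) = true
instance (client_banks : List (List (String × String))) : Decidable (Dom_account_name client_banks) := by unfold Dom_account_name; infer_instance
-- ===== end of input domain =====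

-- B replaces A's per-account transit-set rebuild and inner ordered dict scan by lookup
-- tables built once, so each account is handled by constant-time lookups (objective: simpler).

-- ===== PORT A =====
-- eligible_institutions: (institution_name, transit_number, institution_number or None)
def pvEligible : List (String × String × Option String) :=
  [("BMO", "001", none), ("SCOTIA_BANK", "002", none),
   ("NATIONAL", "003", some "27"), ("TD", "003", some "32"), ("XPTO", "003", some "55")]

-- is_there: rebuilds the list of transit numbers, makes a set, tests membership
def pvIsThere (account_first_number : String) : Bool :=
  let elegible_inst_numbers :=
    pvEligible.foldl (fun acc each_bank => acc ++ [each_bank.2.1]) []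
  let set_eleg := PySem.Set.ofList elegible_inst_numbers
  set_eleg.contains account_first_number

-- create_new_dict: the -1 sentinel for "no institution_number" is modelled as `none`
def pvCreateNewDict : PySem.Dict (String × Option String) String :=
  pvEligible.foldl (fun bank_name each_bank =>
    match each_bank.2.2 with
    | none => bank_name.insert (each_bank.2.1, none) each_bank.1
    | some inst => bank_name.insert (each_bank.2.1, some inst) each_bank.1)
    PySem.Dict.empty

-- find_name2: ordered scan over the dict keys (falls through to `none` where Python
-- returns None; account['institution_number'] on a missing key compares unequal here,
-- where Python raises KeyError — both cases are excluded by Pre_)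
def pvFindName2 (new_dict : PySem.Dict (String × Option String) String)
    (account : List (String × String)) : List (String × Option String) → Option String
  | [] => none
  | (p1, p2) :: rest =>
    if (PySem.Dict.ofList account).get? "transit_number" == some p1 then
      match p2 with
      | some s =>
        if ((PySem.Dict.ofList account).get? "institution_number" == some s) then
          new_dict.get? (p1, p2)
        else pvFindName2 new_dict account rest
      | none => new_dict.get? (p1, p2)
    else pvFindName2 new_dict account rest

-- the main loop of A (result accumulator, append per element); missing 'transit_number'
-- (Python KeyError) and a None name (Python TypeError) are read as "" — excluded by Pre_
def pvLoopA (dict_banks : PySem.Dict (String × Option String) String)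
    (result : List String) : List (List (String × String)) → List String
  | [] => result
  | each :: rest =>
    let account_first_number := ((PySem.Dict.ofList each).get? "transit_number").getD ""
    if pvIsThere account_first_number then
      pvLoopA dict_banks
        (result ++ ["Account registered: " ++ (pvFindName2 dict_banks each dict_banks.keys).getD ""]) rest
    else
      pvLoopA dict_banks (result ++ ["Account not registered"]) rest

def account_name (client_banks : List (List (String × String))) : List String :=
  pvLoopA pvCreateNewDict [] client_banks

-- ===== PORT B =====
-- the three tables built once: valid transit set, transit-only names, (transit, inst) names
def pvTables : PySem.Set String × PySem.Dict String String × PySem.Dict (String × String) String :=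
  pvEligible.foldl (fun acc bank =>
    let valid := PySem.Set.add acc.1 bank.2.1
    match bank.2.2 with
    | none => (valid, acc.2.1.insert bank.2.1 bank.1, acc.2.2)
    | some inst => (valid, acc.2.1, acc.2.2.insert (bank.2.1, inst) bank.1))
    (PySem.Set.empty, PySem.Dict.empty, PySem.Dict.empty)

-- B's loop: constant-time lookups only (pair_table.get(...) yielding None, and missing
-- account keys, are read as "" — those inputs raise in Python and are excluded by Pre_)
def pvLoopB (valid : PySem.Set String) (transit_only : PySem.Dict String String)
    (pair_table : PySem.Dict (String × String) String)
    (result : List String) : List (List (String × String)) → List String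
  | [] => result
  | acct :: rest =>
    let t := ((PySem.Dict.ofList acct).get? "transit_number").getD ""
    if !(valid.contains t) then
      pvLoopB valid transit_only pair_table (result ++ ["Account not registered"]) rest
    else if transit_only.contains t then
      pvLoopB valid transit_only pair_table
        (result ++ ["Account registered: " ++ transit_only.getD t ""]) rest
    else
      pvLoopB valid transit_only pair_table
        (result ++ ["Account registered: " ++
          (pair_table.get? (t, ((PySem.Dict.ofList acct).get? "institution_number").getD "")).getD ""]) rest

def account_name_alt (client_banks : List (List (String × String))) : List String :=
  pvLoopB pvTables.1 pvTables.2.1 pvTables.2.2 [] client_banks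

-- ===== PRECONDITION & SPEC =====
-- Pre_ excludes exactly the inputs where the Python A raises: an account without a
-- 'transit_number' key (KeyError), and a '003' account whose 'institution_number' is
-- missing (KeyError) or matches no eligible institution (TypeError: None concatenation).
def Pre_account_name (client_banks : List (List (String × String))) : Prop :=
  ∀ acct ∈ client_banks,
    ((PySem.Dict.ofList acct).get? "transit_number").isSome = true ∧
    ((PySem.Dict.ofList acct).get? "transit_number" = some "003" →
      (PySem.Dict.ofList acct).get? "institution_number" = some "27" ∨
      (PySem.Dict.ofList acct).get? "institution_number" = some "32" ∨
      (PySem.Dict.ofList acct).get? "institution_number" = some "55")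
instance (client_banks : List (List (String × String))) : Decidable (Pre_account_name client_banks) := by unfold Pre_account_name; infer_instance

def pvWitness_account_name : (List (List (String × String))) :=
  [[("transit_number", "001")], [("transit_number", "003"), ("institution_number", "32")],
   [("transit_number", "009")]]

def Spec_account_name (client_banks : List (List (String × String))) (out : List String) : Prop := out = account_name_alt client_banks
instance (client_banks : List (List (String × String))) (out : List String) : Decidable (Spec_account_name client_banks out) := by unfold Spec_account_name; infer_instance

-- ===== CLAIM (what is proved, stated in full; the proofs are below) =====
def Claim_equal_account_name : Prop := ∀ (client_banks : List (List (String × String))), Dom_account_name client_banks → Pre_account_name client_banks → Spec_account_name client_banks (account_name client_banks)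

-- ===== LEMMAS AND PROOFS =====

-- per-element value of A's loop body
def pvStepA (acct : List (String × String)) : String :=
  if pvIsThere (((PySem.Dict.ofList acct).get? "transit_number").getD "") then
    "Account registered: " ++ (pvFindName2 pvCreateNewDict acct pvCreateNewDict.keys).getD ""
  else "Account not registered"

-- per-element value of B's loop body
def pvStepB (acct : List (String × String)) : String :=
  if !(pvTables.1.contains (((PySem.Dict.ofList acct).get? "transit_number").getD "")) then
    "Account not registered"
  else if pvTables.2.1.contains (((PySem.Dict.ofList acct).get? "transit_number").getD "") then
    "Account registered: " ++ pvTables.2.1.getD (((PySem.Dict.ofList acct).get? "transit_number").getD "") ""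
  else
    "Account registered: " ++
      (pvTables.2.2.get? ((((PySem.Dict.ofList acct).get? "transit_number").getD ""),
        (((PySem.Dict.ofList acct).get? "institution_number").getD ""))).getD ""

lemma pv_loopA_eq (cbs : List (List (String × String))) :
    ∀ res, pvLoopA pvCreateNewDict res cbs = res ++ cbs.map pvStepA := by
  induction cbs with
  | nil => intro res; simp [pvLoopA]
  | cons a r ih =>
    intro res
    by_cases h : pvIsThere (((PySem.Dict.ofList a).get? "transit_number").getD "")
    · simp [pvLoopA, pvStepA, h, ih]
    · simp [pvLoopA, pvStepA, h, ih]

lemma pv_loopB_eq (cbs : List (List (String × String))) :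
    ∀ res, pvLoopB pvTables.1 pvTables.2.1 pvTables.2.2 res cbs = res ++ cbs.map pvStepB := by
  induction cbs with
  | nil => intro res; simp [pvLoopB]
  | cons a r ih =>
    intro res
    simp [pvLoopB, pvStepB, ih]
    all_goals split_ifs <;> simp

-- closed facts about the constant tables
lemma pv_isThere_eq (t : String) :
    pvIsThere t = (["001", "002", "003"] : List String).contains t := rfl

lemma pv_valid_contains (t : String) :
    pvTables.1.contains t = (["001", "002", "003"] : List String).contains t := rfl

lemma pv_t1 : pvTables.1 = ["001", "002", "003"] := rfl

lemma pv_t2 : pvTables.2.1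
    = (PySem.Dict.empty.insert "001" "BMO").insert "002" "SCOTIA_BANK" := rfl

lemma pv_t3 : pvTables.2.2
    = ((PySem.Dict.empty.insert ("003", "27") "NATIONAL").insert
        ("003", "32") "TD").insert ("003", "55") "XPTO" := rfl

lemma pv_g1 : pvCreateNewDict.get? ("001", none) = some "BMO" := rfl
lemma pv_g2 : pvCreateNewDict.get? ("002", none) = some "SCOTIA_BANK" := rfl
lemma pv_g3 : pvCreateNewDict.get? ("003", some "27") = some "NATIONAL" := rfl
lemma pv_g4 : pvCreateNewDict.get? ("003", some "32") = some "TD" := rfl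
lemma pv_g5 : pvCreateNewDict.get? ("003", some "55") = some "XPTO" := rfl

lemma pv_keys :
    pvCreateNewDict.keys = [("001", none), ("002", none),
      ("003", some "27"), ("003", some "32"), ("003", some "55")] := rfl

-- per-account equality under the per-account precondition
lemma pv_step_eq (acct : List (String × String)) (t : String)
    (h1 : (PySem.Dict.ofList acct).get? "transit_number" = some t)
    (h2 : t = "003" →
      (PySem.Dict.ofList acct).get? "institution_number" = some "27" ∨
      (PySem.Dict.ofList acct).get? "institution_number" = some "32" ∨
      (PySem.Dict.ofList acct).get? "institution_number" = some "55") :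
    pvStepA acct = pvStepB acct := by
  by_cases e1 : t = "001"
  · subst e1
    simp [pvStepA, pvStepB, pvFindName2, pv_keys, pv_isThere_eq, pv_g1, pv_t1, pv_t2,
      PySem.Dict.contains_insert, PySem.Dict.getD_insert, h1]
  · by_cases e2 : t = "002"
    · subst e2
      simp [pvStepA, pvStepB, pvFindName2, pv_keys, pv_isThere_eq, pv_g2, pv_t1, pv_t2, h1]
    · by_cases e3 : t = "003"
      · subst e3
        rcases h2 rfl with hi | hi | hi
        · simp [pvStepA, pvStepB, pvFindName2, pv_keys, pv_isThere_eq, pv_g3, pv_t1, pv_t2,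
            pv_t3, PySem.Dict.contains_insert, PySem.Dict.get?_insert, h1, hi]
        · simp [pvStepA, pvStepB, pvFindName2, pv_keys, pv_isThere_eq, pv_g4, pv_t1, pv_t2,
            pv_t3, PySem.Dict.contains_insert, PySem.Dict.get?_insert, h1, hi]
        · simp [pvStepA, pvStepB, pvFindName2, pv_keys, pv_isThere_eq, pv_g5, pv_t1, pv_t2,
            pv_t3, PySem.Dict.contains_insert, h1, hi]
      · simp only [pvStepA, pvStepB, h1, Option.getD_some, pv_isThere_eq, pv_valid_contains]
        simp [e1, e2, e3]

-- ===== VERDICT (by name: the statement is the Claim_ definition above) =====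
theorem account_name_spec : Claim_equal_account_name := by
  intro cbs _ hpre
  unfold Spec_account_name account_name account_name_alt
  rw [pv_loopA_eq, pv_loopB_eq]
  simp only [List.nil_append]
  apply List.map_congr_left
  intro acct ha
  obtain ⟨hs, h003⟩ := hpre acct ha
  obtain ⟨t, h1⟩ := Option.isSome_iff_exists.mp hs
  exact pv_step_eq acct t h1 (fun he => h003 (he ▸ h1))
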